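-- pv_equiv track=rewrite | github.com/RaulHerra/Programacion | modular4_calculo_1_2_3_4.py | calculationOccurs
-- ===== SOURCE A (Python) =====
-- def calculationOccurs(n,i=1):
--     counter=1
--     finalNumber=n
--     while counter<i:
--         n=str(n)
--         n+=n[0]
--         n=int(n)
--         finalNumber+=n
--         counter+=1
--     return finalNumber
-- ===== SOURCE B (Python) =====
-- def calculationOccurs(n, i=1):
--     if i <= 1:
--         return n
--     d = int(str(n)[0])            # leading digit, invariant under the append step
--     r = (10 ** i - 1) // 9        # repunit 11...1 of length i
--     return n * r + d * ((r - i) // 9)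
-- ===== Notes on version B (the rewrite author's own statement) =====
-- stated objective: faster
-- what changed: A repeatedly re-stringifies n and appends its first character inside a loop (quadratic work in i); B notes the leading digit is invariant, so the k-th value is 10^k*n + d*repunit(k), and returns the closed-form sum n*R + d*(R-i)//9 with R the length-i repunit, built in one shot.
import Mathlib
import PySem

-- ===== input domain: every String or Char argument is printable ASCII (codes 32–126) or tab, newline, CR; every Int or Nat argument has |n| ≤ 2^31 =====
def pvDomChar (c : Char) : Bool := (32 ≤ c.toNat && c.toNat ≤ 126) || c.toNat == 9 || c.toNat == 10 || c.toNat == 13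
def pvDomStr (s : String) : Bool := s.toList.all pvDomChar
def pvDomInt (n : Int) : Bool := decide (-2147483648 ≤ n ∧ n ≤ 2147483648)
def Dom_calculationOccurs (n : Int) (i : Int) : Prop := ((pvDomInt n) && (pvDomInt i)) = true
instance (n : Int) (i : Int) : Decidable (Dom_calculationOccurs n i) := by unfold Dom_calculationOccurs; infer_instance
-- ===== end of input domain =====

-- B replaces A's per-iteration restringify-append-reparse loop by the closed-form sum
-- n*R + d*((R-i)//9) with R the length-i repunit and d the (invariant) leading digit.

-- ===== PORT A =====
-- A's while-loop: counter<i with counter starting at 1 runs (i-1).toNat times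
def pvLoopA : Nat → Int → Int → Int
  | 0, _, finalNumber => finalNumber
  | f+1, n, finalNumber =>
    let s := PySem.Int.toChars n                                -- n = str(n)
    let s2 := s ++ [(PySem.List.pyGet? s 0).getD ' ']           -- n += n[0]  (s is never empty)
    let n2 := (PySem.Int.ofChars? s2).getD 0                    -- n = int(n); total form: Pre_ excludes the ValueError inputs (n < 0 with i ≥ 2)
    pvLoopA f n2 (finalNumber + n2)                             -- finalNumber += n; counter += 1

def calculationOccurs (n : Int) (i : Int) : Int := pvLoopA (i - 1).toNat n n

-- ===== PORT B =====
def calculationOccurs_alt (n : Int) (i : Int) : Int :=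
  if i ≤ 1 then n
  else
    let d := (PySem.Int.ofChars? [(PySem.List.pyGet? (PySem.Int.toChars n) 0).getD ' ']).getD 0
      -- d = int(str(n)[0]); total form: Pre_ excludes n < 0 with i ≥ 2 (ValueError)
    let r := PySem.Int.floordiv (10 ^ i.toNat - 1) 9            -- r = (10 ** i - 1) // 9
    n * r + d * PySem.Int.floordiv (r - i) 9                    -- n * r + d * ((r - i) // 9)

-- ===== PRECONDITION & SPEC =====
-- Pre_ excludes exactly the inputs where A raises ValueError: n < 0 with i ≥ 2
-- (int(str(n) + '-') fails); B raises there too (int('-')).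
def Pre_calculationOccurs (n : Int) (i : Int) : Prop := 0 ≤ n ∨ i ≤ 1
instance (n : Int) (i : Int) : Decidable (Pre_calculationOccurs n i) := by unfold Pre_calculationOccurs; infer_instance
def pvWitness_calculationOccurs : Int × Int := (5, 3)

def Spec_calculationOccurs (n : Int) (i : Int) (out : Int) : Prop := out = calculationOccurs_alt n i
instance (n : Int) (i : Int) (out : Int) : Decidable (Spec_calculationOccurs n i out) := by unfold Spec_calculationOccurs; infer_instance

-- ===== CLAIM (what is proved, stated in full; the proofs are below) =====
def Claim_equal_calculationOccurs : Prop := ∀ (n : Int) (i : Int), Dom_calculationOccurs n i → Pre_calculationOccurs n i → Spec_calculationOccurs n i (calculationOccurs n i)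

-- ===== LEMMAS AND PROOFS =====

-- handle on the private digit parser inside PySem.Int.ofChars?: D is int()'s digit-grammar
-- parser, G its accumulator loop; the conjuncts are its defining reductions (all by rfl)
theorem pvParserHandle : ∃ (D : List Char → Option Nat) (G : List Char → Bool → Nat → Option Nat),
    (∀ s : List Char,
      PySem.Int.ofChars? s =
        (match (List.dropWhile PySem.Int.isIntSpace (List.dropWhile PySem.Int.isIntSpace s).reverse).reverse with
         | '-' :: ds => Option.map (fun n => -n) (do let a ← D ds; pure (a : Int))
         | '+' :: ds => Option.map (fun n => n) (do let a ← D ds; pure (a : Int))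
         | ds => Option.map (fun n => n) (do let a ← D ds; pure (a : Int)))) ∧
    (D = fun x => match x with | [] => none | cs => G cs false 0) ∧
    (∀ b acc, G [] b acc = if b = true then some acc else none) ∧
    (∀ c rest b acc, G (c :: rest) b acc =
       if c.isDigit = true then G rest true (acc * 10 + (c.toNat - '0'.toNat))
       else if c = '_' ∧ b = true then
         (match rest with
          | d :: _ => if d.isDigit = true then G rest false acc else none
          | [] => none)
       else none) := by
  refine ⟨_, _, fun s => rfl, rfl, fun b acc => rfl, fun c rest b acc => rfl⟩

theorem pvIsIntSpace_of_isDigit (c : Char) (h : c.isDigit = true) : PySem.Int.isIntSpace c = false := by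
  simp only [PySem.Int.isIntSpace, Bool.or_eq_false_iff, decide_eq_false_iff_not]
  refine ⟨⟨⟨⟨⟨?_,?_⟩,?_⟩,?_⟩,?_⟩,?_⟩ <;> rintro rfl <;> simp [Char.isDigit] at h

theorem pvDropWhile_digits (l : List Char) (hd : ∀ c ∈ l, c.isDigit = true) :
    List.dropWhile PySem.Int.isIntSpace l = l := by
  rw [List.dropWhile_eq_self_iff]
  intro hl
  simp [pvIsIntSpace_of_isDigit _ (hd _ (List.getElem_mem hl))]

-- int() on a nonempty all-digit string is the base-10 fold of its digits
theorem pvParse_digits (ds : List Char) (hne : ds ≠ []) (hd : ∀ c ∈ ds, c.isDigit = true) :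
    PySem.Int.ofChars? ds = some ((ds.foldl (fun a c => a * 10 + (c.toNat - '0'.toNat)) 0 : Nat) : Int) := by
  obtain ⟨D, G, hw, hD, hGnil, hGcons⟩ := pvParserHandle
  have hG : ∀ (l : List Char) (acc : Nat), (∀ c ∈ l, c.isDigit = true) →
      G l true acc = some (l.foldl (fun a c => a * 10 + (c.toNat - '0'.toNat)) acc) := by
    intro l
    induction l with
    | nil => intro acc _; rw [hGnil]; rfl
    | cons c rest ih =>
      intro acc hdig
      rw [hGcons, if_pos (hdig c (by simp))]
      rw [ih _ (fun x hx => hdig x (by simp [hx]))]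
      rfl
  obtain ⟨c, rest, rfl⟩ := List.exists_cons_of_ne_nil hne
  rw [hw]
  rw [pvDropWhile_digits _ hd]
  rw [pvDropWhile_digits _ (by intro x hx; exact hd x (List.mem_reverse.mp hx))]
  rw [List.reverse_reverse]
  have hc := hd c (by simp)
  split
  · rename_i heq; rw [List.cons.injEq] at heq; obtain ⟨rfl, -⟩ := heq; simp [Char.isDigit] at hc
  · rename_i heq; rw [List.cons.injEq] at heq; obtain ⟨rfl, -⟩ := heq; simp [Char.isDigit] at hc
  · rw [hD]
    simp only []
    rw [hGcons, if_pos hc]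
    rw [hG _ _ (fun x hx => hd x (by simp [hx]))]
    rfl

-- leading decimal digit
def pvLead (m : Nat) : Nat := if h : m < 10 then m else pvLead (m / 10)
decreasing_by exact Nat.div_lt_self (by omega) (by omega)

theorem pvLead_lt (m : Nat) : pvLead m < 10 := by
  induction m using Nat.strong_induction_on with
  | _ m ih =>
    rw [pvLead]; split
    · assumption
    · exact ih _ (Nat.div_lt_self (by omega) (by omega))

theorem pvDigitChar_toNat (k : Nat) (h : k < 10) : (Nat.digitChar k).toNat = 48 + k := by
  interval_cases k <;> decide

theorem pvNatVal_toDigits (m : Nat) :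
    (Nat.toDigits 10 m).foldl (fun a c => a * 10 + (c.toNat - '0'.toNat)) 0 = m := by
  induction m using Nat.strong_induction_on with
  | _ m ih =>
    by_cases h : m < 10
    · rw [Nat.toDigits_of_lt_base h]
      simp [pvDigitChar_toNat m h]
    · rw [Nat.toDigits_of_base_le (by omega) (by omega)]
      rw [List.foldl_append]
      rw [ih _ (Nat.div_lt_self (by omega) (by omega))]
      simp [pvDigitChar_toNat _ (Nat.mod_lt _ (by omega))]
      omega

theorem pvRoundtrip (m : Nat) : PySem.Int.ofChars? (Nat.toDigits 10 m) = some (m : Int) := by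
  rw [pvParse_digits _ (by have := @Nat.length_toDigits_pos 10 m; intro h; simp [h] at this)
        (fun c hc => Nat.isDigit_of_mem_toDigits (by omega) (by omega) hc)]
  rw [pvNatVal_toDigits]

theorem pvHead_toDigits (m : Nat) : (Nat.toDigits 10 m)[0]? = some (Nat.digitChar (pvLead m)) := by
  induction m using Nat.strong_induction_on with
  | _ m ih =>
    rw [pvLead]
    split
    · rename_i h
      rw [Nat.toDigits_of_lt_base h]
      rfl
    · rename_i h
      rw [Nat.toDigits_of_base_le (by omega) (by omega)]
      rw [List.getElem?_append_left (by exact Nat.length_toDigits_pos)]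
      exact ih _ (Nat.div_lt_self (by omega) (by omega))

theorem pvLead_step (m : Nat) : pvLead (10 * m + pvLead m) = pvLead m := by
  rcases Nat.eq_zero_or_pos m with rfl | hm
  · simp [pvLead]
  · have hlt := pvLead_lt m
    rw [pvLead]
    split
    · omega
    · have hdiv : (10 * m + pvLead m) / 10 = m := by omega
      rw [hdiv]

-- the one-step append-and-reparse of A computes 10*m + leading digit
theorem pvStep_parse (m : Nat) :
    PySem.Int.ofChars? (Nat.toDigits 10 m ++ [Nat.digitChar (pvLead m)]) = some ((10 * m + pvLead m : Nat) : Int) := by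
  rcases Nat.eq_zero_or_pos m with rfl | hm
  · have h0 : pvLead 0 = 0 := by rw [pvLead]; simp
    rw [h0, Nat.toDigits_zero]
    decide
  · rw [← Nat.toDigits_of_lt_base (pvLead_lt m)]
    rw [Nat.toDigits_append_toDigits (by omega) hm (pvLead_lt m)]
    exact pvRoundtrip _

-- the sequence of values A accumulates: f more steps from current value m with digit d
def pvSum : Nat → Nat → Nat → Int
  | 0, _, _ => 0
  | f+1, m, d => ((10 * m + d : Nat) : Int) + pvSum f (10 * m + d) d

theorem pvLoopA_char (f : Nat) : ∀ (m : Nat) (fin : Int),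
    pvLoopA f (m : Int) fin = fin + pvSum f m (pvLead m) := by
  induction f with
  | zero => intro m fin; simp [pvLoopA, pvSum]
  | succ f ih =>
    intro m fin
    rw [pvLoopA]
    have hs : PySem.Int.toChars (m : Int) = Nat.toDigits 10 m := by
      simp [PySem.Int.toChars]
    rw [hs]
    rw [PySem.List.pyGet?_zero, pvHead_toDigits]
    simp only [Option.getD_some]
    rw [pvStep_parse]
    simp only [Option.getD_some]
    rw [ih (10 * m + pvLead m)]
    rw [pvSum, pvLead_step]
    push_cast
    ring

def pvRep : Nat → Int
  | 0 => 0
  | k+1 => 10 * pvRep k + 1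

def pvQ : Nat → Int
  | 0 => 0
  | k+1 => pvQ k + pvRep k

theorem pvSum_closed (f : Nat) : ∀ (m d : Nat),
    (m : Int) + pvSum f m d = (m : Int) * pvRep (f + 1) + (d : Int) * pvQ (f + 1) := by
  induction f with
  | zero => intro m d; simp [pvSum, pvRep, pvQ]
  | succ f ih =>
    intro m d
    have h := ih (10 * m + d) d
    rw [pvSum]
    rw [show pvRep (f + 1 + 1) = 10 * pvRep (f + 1) + 1 from rfl,
        show pvQ (f + 1 + 1) = pvQ (f + 1) + pvRep (f + 1) from rfl]
    push_cast at h ⊢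
    linarith [h]

theorem pvRep_eq (k : Nat) : 9 * pvRep k = 10 ^ k - 1 := by
  induction k with
  | zero => simp [pvRep]
  | succ k ih => rw [pvRep]; push_cast [pow_succ]; linarith

theorem pvQ_eq (k : Nat) : 9 * pvQ k = pvRep k - (k : Int) := by
  induction k with
  | zero => simp [pvQ, pvRep]
  | succ k ih => rw [pvQ, pvRep]; push_cast; linarith

-- ===== VERDICT (by name: the statement is the Claim_ definition above) =====
theorem calculationOccurs_spec : Claim_equal_calculationOccurs := by
  intro n i _ hpre
  unfold Spec_calculationOccurs calculationOccurs calculationOccurs_alt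
  by_cases hi : i ≤ 1
  · rw [if_pos hi]
    have h0 : (i - 1).toNat = 0 := by omega
    rw [h0]; rfl
  · rw [if_neg hi]
    have hn : 0 ≤ n := by rcases hpre with h | h; exacts [h, absurd h hi]
    obtain ⟨m, rfl⟩ : ∃ m : Nat, n = (m : Int) := ⟨n.toNat, by omega⟩
    rw [pvLoopA_char, pvSum_closed]
    have hs : PySem.Int.toChars (m : Int) = Nat.toDigits 10 m := by
      simp [PySem.Int.toChars]
    have hd1 : PySem.Int.ofChars? [Nat.digitChar (pvLead m)] = some ((pvLead m : Nat) : Int) := by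
      rw [pvParse_digits _ (by simp)
        (by intro c hc; simp at hc; subst hc
            simp [Nat.isDigit_digitChar, pvLead_lt m])]
      congr 2
      simp [List.foldl, pvDigitChar_toNat _ (pvLead_lt m)]
    have hrep : PySem.Int.floordiv ((10:Int) ^ i.toNat - 1) 9 = pvRep i.toNat := by
      rw [PySem.Int.floordiv_eq_ediv_of_pos (by norm_num), ← pvRep_eq,
        Int.mul_ediv_cancel_left _ (by norm_num)]
    have hq : PySem.Int.floordiv (pvRep i.toNat - i) 9 = pvQ i.toNat := by
      have h9 : pvRep i.toNat - i = 9 * pvQ i.toNat := by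
        rw [pvQ_eq]; congr 1; omega
      rw [PySem.Int.floordiv_eq_ediv_of_pos (by norm_num), h9,
        Int.mul_ediv_cancel_left _ (by norm_num)]
    simp only [hs, PySem.List.pyGet?_zero, pvHead_toDigits, Option.getD_some, hd1, hrep, hq]
    rw [show (i - 1).toNat + 1 = i.toNat by omega]
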